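-- pv_equiv track=rewrite | github.com/GabrielVelasco/Python | AdHocProblems/dCluster.py | maiorDcluster
-- ===== SOURCE A (Python) =====
-- def maiorDcluster(V, d):
-- 	# diff par a par menor igual a d
-- 	# maior (tamanho conjunto) d-cluster
--
-- 	# para cada subconjunto S de V, ordenar V? (evita ter q olhar par-par de S)
-- 	tamMaiorDCluster = 0
-- 	maiorDcluster = []
--
-- 	for i in range(0, len(V)): 				# n
-- 		for j in range(i, len(V)):			# n
-- 				# testa todos subconjuntos
--
-- 				S = V[i:j+1]				# n
-- 				tamS = j-i+1
-- 				S.sort()					# n lgn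
--
-- 				maiorDist = abs(S[0] - S[tamS-1])
-- 				if maiorDist <= d:
-- 					# S eh possivel resposta (d-cluster)
-- 					if tamS > tamMaiorDCluster:
-- 						tamMaiorDCluster = tamS
-- 						maiorDcluster = S
-- 				else:
-- 					break
--
-- 	return (tamMaiorDCluster, maiorDcluster)
-- ===== SOURCE B (Python) =====
-- def maiorDcluster(V, d):
--     # Incremental min/max per start index instead of sorting every slice;
--     # remember only (best length, best start) and sort the winning slice once.
--     n = len(V)
--     best_len = 0
--     best_start = 0
--     for i in range(n):
--         mn = mx = V[i]
--         for j in range(i, n):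
--             x = V[j]
--             if x < mn:
--                 mn = x
--             if x > mx:
--                 mx = x
--             if mx - mn > d:
--                 break
--             if j - i + 1 > best_len:
--                 best_len = j - i + 1
--                 best_start = i
--     return (best_len, sorted(V[best_start:best_start + best_len]))
-- ===== Notes on version B (the rewrite author's own statement) =====
-- stated objective: faster
-- what changed: Instead of slicing and fully sorting every window (O(n^3 log n)), B maintains a running min/max per start index, keeps only (best length, best start), and sorts the single winning slice once at the end.
import Mathlib
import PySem

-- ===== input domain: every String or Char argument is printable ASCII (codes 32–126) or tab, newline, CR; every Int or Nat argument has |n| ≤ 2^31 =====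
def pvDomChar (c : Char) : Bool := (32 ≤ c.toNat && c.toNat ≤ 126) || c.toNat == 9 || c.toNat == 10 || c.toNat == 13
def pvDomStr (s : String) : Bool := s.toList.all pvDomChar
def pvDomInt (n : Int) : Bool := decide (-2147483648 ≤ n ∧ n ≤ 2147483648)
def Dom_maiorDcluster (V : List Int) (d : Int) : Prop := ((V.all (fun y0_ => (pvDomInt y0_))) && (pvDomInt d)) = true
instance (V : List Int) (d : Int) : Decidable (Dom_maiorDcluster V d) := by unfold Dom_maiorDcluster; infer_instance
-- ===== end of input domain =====

-- B replaces A's per-window slice-and-sort with a running min/max per start index and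
-- one final sort of the winning slice (objective: faster, asymptotically).

-- ===== PORT A =====
def mdcInnerA (V : List Int) (d i : Int) : List Int → Int × List Int → Int × List Int
  | [], st => st
  | j :: rest, st =>
    let S := PySem.List.sorted (PySem.List.slice V (some i) (some (j + 1))) (fun x => x) false
    let tamS := j - i + 1
    let maiorDist := |PySem.List.pyGetD S 0 0 - PySem.List.pyGetD S (tamS - 1) 0|
    if maiorDist ≤ d then
      mdcInnerA V d i rest (if tamS > st.1 then (tamS, S) else st)
    else st

def maiorDcluster (V : List Int) (d : Int) : Int × List Int :=
  (PySem.List.pyRange 0 (V.length : Int) 1).foldl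
    (fun st i => mdcInnerA V d i (PySem.List.pyRange i (V.length : Int) 1) st) (0, [])

-- ===== PORT B =====
def mdcInnerB (V : List Int) (d i : Int) : List Int → Int → Int → Int × Int → Int × Int
  | [], _, _, st => st
  | j :: rest, mn, mx, st =>
    let x := PySem.List.pyGetD V j 0
    let mn' := if x < mn then x else mn
    let mx' := if x > mx then x else mx
    if mx' - mn' > d then st
    else mdcInnerB V d i rest mn' mx' (if j - i + 1 > st.1 then (j - i + 1, i) else st)

def maiorDcluster_alt (V : List Int) (d : Int) : Int × List Int :=
  let st := (PySem.List.pyRange 0 (V.length : Int) 1).foldl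
    (fun st i => mdcInnerB V d i (PySem.List.pyRange i (V.length : Int) 1)
      (PySem.List.pyGetD V i 0) (PySem.List.pyGetD V i 0) st) (0, 0)
  (st.1, PySem.List.sorted (PySem.List.slice V (some st.2) (some (st.2 + st.1))) (fun x => x) false)

-- ===== PRECONDITION & SPEC =====
def Spec_maiorDcluster (V : List Int) (d : Int) (out : Int × List Int) : Prop := out = maiorDcluster_alt V d
instance (V : List Int) (d : Int) (out : Int × List Int) : Decidable (Spec_maiorDcluster V d out) := by unfold Spec_maiorDcluster; infer_instance

-- ===== CLAIM (what is proved, stated in full; the proofs are below) =====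
def Claim_equal_maiorDcluster : Prop := ∀ (V : List Int) (d : Int), Dom_maiorDcluster V d → Spec_maiorDcluster V d (maiorDcluster V d)

-- ===== LEMMAS AND PROOFS =====

-- relation between A's loop state and B's loop state
def mdcRel (V : List Int) (a : Int × List Int) (b : Int × Int) : Prop :=
  a.1 = b.1 ∧ 0 ≤ b.2 ∧
  a.2 = PySem.List.sorted (PySem.List.slice V (some b.2) (some (b.2 + b.1))) (fun x => x) false


theorem pv_slice_self {V : List Int} {i : Int} (hi : 0 ≤ i) :
    PySem.List.slice V (some i) (some i) = [] := by
  rw [PySem.List.slice_toNat V hi hi]; simp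

theorem pv_slice_snoc {V : List Int} {i j : Int} (hi : 0 ≤ i) (hij : i ≤ j)
    (hj : j < (V.length : Int)) :
    PySem.List.slice V (some i) (some (j + 1)) =
      PySem.List.slice V (some i) (some j) ++ [PySem.List.pyGetD V j 0] := by
  have hj0 : 0 ≤ j := le_trans hi hij
  have hjl : j.toNat < V.length := by omega
  rw [PySem.List.slice_toNat V hi (by omega), PySem.List.slice_toNat V hi hj0,
    PySem.List.pyGetD_eq_getElem V 0 hj0 hj]
  have h1 : (j + 1).toNat - i.toNat = (j.toNat - i.toNat) + 1 := by omega
  rw [h1, List.take_add_one]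
  congr 1
  rw [List.getElem?_drop]
  have h2 : i.toNat + (j.toNat - i.toNat) = j.toNat := by omega
  rw [h2, List.getElem?_eq_getElem hjl]
  rfl

theorem pv_slice_len {V : List Int} {i j : Int} (hi : 0 ≤ i) (hij : i ≤ j)
    (hj : j < (V.length : Int)) :
    ((PySem.List.slice V (some i) (some (j + 1))).length : Int) = j + 1 - i := by
  rw [PySem.List.slice_toNat V hi (by omega)]
  simp only [List.length_take, List.length_drop]
  omega

theorem pv_head_mem {V : List Int} {i j : Int} (hi : 0 ≤ i) (hij : i ≤ j)
    (hj : j < (V.length : Int)) :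
    PySem.List.pyGetD V i 0 ∈ PySem.List.slice V (some i) (some (j + 1)) := by
  have hil : i.toNat < V.length := by omega
  rw [PySem.List.pyGetD_eq_getElem V 0 hi (by omega), PySem.List.slice_toNat V hi (by omega)]
  have hlen : 0 < ((V.drop i.toNat).take ((j+1).toNat - i.toNat)).length := by
    simp only [List.length_take, List.length_drop]; omega
  have : ((V.drop i.toNat).take ((j+1).toNat - i.toNat))[0] = V[i.toNat] := by
    simp [List.getElem_take, List.getElem_drop]
  exact this ▸ List.getElem_mem hlen


theorem pv_fmin_mem (l : List Int) (a : Int) : l.foldl min a = a ∨ l.foldl min a ∈ l := by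
  induction l generalizing a with
  | nil => left; rfl
  | cons x xs ih =>
    rcases ih (min a x) with h | h
    · rcases le_or_gt a x with hc | hc
      · left; rw [List.foldl_cons, h, min_eq_left hc]
      · right; rw [List.foldl_cons, h, min_eq_right hc.le]; exact List.mem_cons_self
    · right; exact List.mem_cons_of_mem _ h

theorem pv_fmin_le (l : List Int) (a : Int) :
    l.foldl min a ≤ a ∧ ∀ y ∈ l, l.foldl min a ≤ y := by
  induction l generalizing a with
  | nil => exact ⟨le_refl a, by simp⟩
  | cons x xs ih =>
    obtain ⟨h1, h2⟩ := ih (min a x)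
    refine ⟨le_trans h1 (min_le_left _ _), ?_⟩
    intro y hy
    rcases List.mem_cons.1 hy with rfl | hy
    · exact le_trans h1 (min_le_right _ _)
    · exact h2 y hy

theorem pv_fmax_mem (l : List Int) (a : Int) : l.foldl max a = a ∨ l.foldl max a ∈ l := by
  induction l generalizing a with
  | nil => left; rfl
  | cons x xs ih =>
    rcases ih (max a x) with h | h
    · rcases le_or_gt x a with hc | hc
      · left; rw [List.foldl_cons, h, max_eq_left hc]
      · right; rw [List.foldl_cons, h, max_eq_right hc.le]; exact List.mem_cons_self
    · right; exact List.mem_cons_of_mem _ h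

theorem pv_fmax_le (l : List Int) (a : Int) :
    a ≤ l.foldl max a ∧ ∀ y ∈ l, y ≤ l.foldl max a := by
  induction l generalizing a with
  | nil => exact ⟨le_refl a, by simp⟩
  | cons x xs ih =>
    obtain ⟨h1, h2⟩ := ih (max a x)
    refine ⟨le_trans (le_max_left _ _) h1, ?_⟩
    intro y hy
    rcases List.mem_cons.1 hy with rfl | hy
    · exact le_trans (le_max_right _ _) h1
    · exact h2 y hy

theorem pv_sorted_first (l : List Int) (h : l ≠ []) :
    PySem.List.pyGetD (PySem.List.sorted l (fun x => x) false) 0 0 ∈ l ∧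
    ∀ y ∈ l, PySem.List.pyGetD (PySem.List.sorted l (fun x => x) false) 0 0 ≤ y := by
  have hs : PySem.List.sorted l (fun x => x) false ≠ [] := by
    rw [ne_eq, PySem.List.sorted_eq_nil_iff]; exact h
  obtain ⟨m, t, hmt⟩ := List.exists_cons_of_ne_nil hs
  rw [hmt, PySem.List.pyGetD_zero_cons]
  constructor
  · have : m ∈ PySem.List.sorted l (fun x => x) false := by rw [hmt]; exact List.mem_cons_self
    exact (PySem.List.mem_sorted l _ false m).1 this
  · exact PySem.List.key_head_sorted_le l (fun x => x) hmt

theorem pv_sorted_last (l : List Int) (h : l ≠ []) :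
    PySem.List.pyGetD (PySem.List.sorted l (fun x => x) false) ((l.length : Int) - 1) 0 ∈ l ∧
    ∀ y ∈ l, y ≤ PySem.List.pyGetD (PySem.List.sorted l (fun x => x) false) ((l.length : Int) - 1) 0 := by
  have hl : 0 < l.length := List.length_pos_iff.2 h
  have hlen : (PySem.List.sorted l (fun x => x) false).length = l.length :=
    PySem.List.length_sorted l _ false
  have hrange : ((l.length : Int) - 1) < ((PySem.List.sorted l (fun x => x) false).length : Int) := by
    rw [hlen]; omega
  rw [PySem.List.pyGetD_eq_getElem _ 0 (by omega) hrange]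
  have hidx : ((l.length : Int) - 1).toNat = l.length - 1 := by omega
  constructor
  · have hm := List.getElem_mem (l := PySem.List.sorted l (fun x => x) false)
      (n := ((l.length : Int) - 1).toNat) (h := by rw [hlen]; omega)
    rw [PySem.List.mem_sorted] at hm
    exact hm
  · intro y hy
    have hy' : y ∈ PySem.List.sorted l (fun x => x) false := (PySem.List.mem_sorted l _ false y).2 hy
    obtain ⟨p, hp, hpe⟩ := List.mem_iff_getElem.1 hy'
    rw [← hpe]
    exact PySem.List.sorted_id_getElem_mono l (by omega) (by omega)


theorem pv_inner (V : List Int) (d i : Int) (hi : 0 ≤ i) (_hin : i < (V.length : Int)) :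
    ∀ (k : Nat) (j0 : Int), ((V.length : Int) - j0).toNat = k → i ≤ j0 →
    ∀ (mn mx : Int),
      mn = (PySem.List.slice V (some i) (some j0)).foldl min (PySem.List.pyGetD V i 0) →
      mx = (PySem.List.slice V (some i) (some j0)).foldl max (PySem.List.pyGetD V i 0) →
    ∀ (a : Int × List Int) (b : Int × Int), mdcRel V a b →
      mdcRel V (mdcInnerA V d i (PySem.List.pyRange j0 (V.length : Int) 1) a)
               (mdcInnerB V d i (PySem.List.pyRange j0 (V.length : Int) 1) mn mx b) := by
  intro k
  induction k with
  | zero =>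
    intro j0 hk _ mn mx _ _ a b hab
    rw [PySem.List.pyRange_one_eq_nil (by omega)]
    exact hab
  | succ k ih =>
    intro j0 hk hij0 mn mx hmn hmx a b hab
    have hj0n : j0 < (V.length : Int) := by omega
    rw [PySem.List.pyRange_one_cons hj0n]
    set v := PySem.List.pyGetD V i 0 with hv
    set x := PySem.List.pyGetD V j0 0 with hx
    set W0 := PySem.List.slice V (some i) (some j0) with hW0
    set W1 := PySem.List.slice V (some i) (some (j0 + 1)) with hW1
    have hsnoc : W1 = W0 ++ [x] := pv_slice_snoc hi hij0 hj0n
    have hne : W1 ≠ [] := by rw [hsnoc]; exact List.append_ne_nil_of_right_ne_nil _ (by simp)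
    have hlenW : (W1.length : Int) = j0 + 1 - i := pv_slice_len hi hij0 hj0n
    have hvW : v ∈ W1 := pv_head_mem hi hij0 hj0n
    -- the updated running min/max are the fold over W1
    have hmn' : (if x < mn then x else mn) = W1.foldl min v := by
      rw [hsnoc, List.foldl_append, ← hmn]
      simp only [List.foldl_cons, List.foldl_nil]
      rcases lt_or_ge x mn with h | h
      · rw [if_pos h, min_eq_right h.le]
      · rw [if_neg (not_lt.2 h), min_eq_left h]
    have hmx' : (if x > mx then x else mx) = W1.foldl max v := by
      rw [hsnoc, List.foldl_append, ← hmx]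
      simp only [List.foldl_cons, List.foldl_nil]
      rcases lt_or_ge mx x with h | h
      · rw [if_pos h, max_eq_right h.le]
      · rw [if_neg (not_lt.2 h), max_eq_left h]
    set mn' := if x < mn then x else mn with hmn'def
    set mx' := if x > mx then x else mx with hmx'def
    have hmnW : mn' ∈ W1 := by
      rcases pv_fmin_mem W1 v with h | h
      · rw [hmn', h]; exact hvW
      · rw [hmn']; exact h
    have hmnle : ∀ y ∈ W1, mn' ≤ y := by rw [hmn']; exact (pv_fmin_le W1 v).2
    have hmxW : mx' ∈ W1 := by
      rcases pv_fmax_mem W1 v with h | h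
      · rw [hmx', h]; exact hvW
      · rw [hmx']; exact h
    have hmxle : ∀ y ∈ W1, y ≤ mx' := by rw [hmx']; exact (pv_fmax_le W1 v).2
    -- A's sorted-slice endpoints equal the running min/max
    obtain ⟨hS0mem, hS0le⟩ := pv_sorted_first W1 hne
    obtain ⟨hSLmem, hSLge⟩ := pv_sorted_last W1 hne
    have hS0 : PySem.List.pyGetD (PySem.List.sorted W1 (fun x => x) false) 0 0 = mn' :=
      le_antisymm (hS0le mn' hmnW) (hmnle _ hS0mem)
    have hSL : PySem.List.pyGetD (PySem.List.sorted W1 (fun x => x) false) ((W1.length : Int) - 1) 0 = mx' :=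
      le_antisymm (hmxle _ hSLmem) (hSLge mx' hmxW)
    have hidx : j0 - i + 1 - 1 = (W1.length : Int) - 1 := by omega
    have habs : |PySem.List.pyGetD (PySem.List.sorted W1 (fun x => x) false) 0 0 -
        PySem.List.pyGetD (PySem.List.sorted W1 (fun x => x) false) (j0 - i + 1 - 1) 0| = mx' - mn' := by
      rw [hidx, hS0, hSL, abs_of_nonpos (by have := hmnle _ hmxW; omega)]
      ring
    show mdcRel V (mdcInnerA V d i (j0 :: PySem.List.pyRange (j0+1) (V.length : Int) 1) a)
                 (mdcInnerB V d i (j0 :: PySem.List.pyRange (j0+1) (V.length : Int) 1) mn mx b)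
    simp only [mdcInnerA, mdcInnerB, ← hW1, ← hx, ← hmn'def, ← hmx'def, habs]
    by_cases hcond : mx' - mn' ≤ d
    · rw [if_pos hcond, if_neg (not_lt.2 hcond)]
      apply ih (j0 + 1) (by omega) (by omega) mn' mx' hmn' hmx'
      have hr1 : a.1 = b.1 := hab.1
      by_cases hupd : j0 - i + 1 > b.1
      · rw [if_pos (by rw [hr1]; exact hupd), if_pos hupd]
        exact ⟨rfl, hi, by show PySem.List.sorted W1 _ false = _
                           rw [show i + (j0 - i + 1) = j0 + 1 by ring]⟩
      · rw [if_neg (by rw [hr1]; exact hupd), if_neg hupd]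
        exact hab
    · rw [if_neg hcond, if_pos (not_le.1 hcond)]
      exact hab

theorem pv_foldl_rel {α β γ : Type} (R : α → β → Prop) (fA : α → γ → α) (fB : β → γ → β) :
    ∀ (l : List γ) (a : α) (b : β), R a b →
      (∀ x ∈ l, ∀ (a : α) (b : β), R a b → R (fA a x) (fB b x)) →
      R (l.foldl fA a) (l.foldl fB b) := by
  intro l
  induction l with
  | nil => intro a b h _; exact h
  | cons x xs ih =>
    intro a b h hstep
    exact ih _ _ (hstep x (List.mem_cons_self) a b h)
      (fun y hy => hstep y (List.mem_cons_of_mem _ hy))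

-- ===== VERDICT (by name: the statement is the Claim_ definition above) =====
theorem maiorDcluster_spec : Claim_equal_maiorDcluster := by
  intro V d _
  unfold Spec_maiorDcluster maiorDcluster maiorDcluster_alt
  have h := pv_foldl_rel (mdcRel V)
    (fun st i => mdcInnerA V d i (PySem.List.pyRange i (V.length : Int) 1) st)
    (fun st i => mdcInnerB V d i (PySem.List.pyRange i (V.length : Int) 1)
      (PySem.List.pyGetD V i 0) (PySem.List.pyGetD V i 0) st)
    (PySem.List.pyRange 0 (V.length : Int) 1) (0, []) (0, 0)
    ⟨rfl, le_refl 0, by show ([] : List Int) = _; rw [show ((0,0) : Int × Int).2 + ((0,0) : Int × Int).1 = 0 from rfl, pv_slice_self (le_refl (0 : Int))]; exact ((PySem.List.sorted_eq_nil_iff _ _ _).2 rfl).symm⟩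
    (by
      intro x hx a b hab
      have hx' := (PySem.List.mem_pyRange_one).1 hx
      exact pv_inner V d x hx'.1 hx'.2 _ x rfl (le_refl x)
        _ _ (by simp [pv_slice_self hx'.1]) (by simp [pv_slice_self hx'.1]) a b hab)
  obtain ⟨h1, h2, h3⟩ := h
  exact Prod.ext h1 h3
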